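-- pv_equiv track=rewrite | github.com/SocioProphet/Heller-Godel | src/heller_godel/mu2_bridge.py | catalan_number
-- ===== SOURCE A (Python) =====
-- def catalan_number(n: int) -> int:
--     """Return the nth Catalan number by its defining convolution."""
--
--     if n < 0:
--         raise ValueError("n must be nonnegative")
--     values = [0] * (n + 1)
--     values[0] = 1
--     for k in range(1, n + 1):
--         values[k] = sum(values[i] * values[k - 1 - i] for i in range(k))
--     return values[n]
-- ===== SOURCE B (Python) =====
-- def catalan_number(n: int) -> int:
--     """Return the nth Catalan number via the direct product recurrence
--     C(k) = C(k-1) * 2*(2k-1) // (k+1), which is exact for integers."""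
--     if n < 0:
--         raise ValueError("n must be nonnegative")
--     c = 1
--     for k in range(1, n + 1):
--         c = c * 2 * (2 * k - 1) // (k + 1)
--     return c
-- ===== Notes on version B (the rewrite author's own statement) =====
-- stated objective: faster
-- what changed: Replaces the O(n^2) convolution table (each entry a sum over all previous pairs) by the O(n) closed-form product recurrence C(k) = C(k-1)*2*(2k-1)//(k+1), keeping only a single running value.
import Mathlib
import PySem

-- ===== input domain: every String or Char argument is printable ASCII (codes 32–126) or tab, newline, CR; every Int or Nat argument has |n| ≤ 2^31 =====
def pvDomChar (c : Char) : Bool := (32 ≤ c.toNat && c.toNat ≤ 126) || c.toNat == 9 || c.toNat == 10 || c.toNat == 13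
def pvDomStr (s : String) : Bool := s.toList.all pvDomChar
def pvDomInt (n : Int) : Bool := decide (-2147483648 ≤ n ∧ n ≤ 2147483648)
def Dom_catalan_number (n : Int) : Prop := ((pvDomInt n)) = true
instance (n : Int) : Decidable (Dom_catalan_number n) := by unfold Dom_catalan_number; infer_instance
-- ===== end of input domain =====

-- B replaces A's O(n^2) convolution table by the O(n) product recurrence
-- C(k) = C(k-1)*2*(2k-1)//(k+1); equivalence is proved on n ≥ 0 (A raises ValueError for n < 0).

-- ===== PORT A =====
-- Literal port of A: build values[0..n], values[0]=1, values[k] = Σ_{i<k} values[i]*values[k-1-i].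
-- List indexing uses getD 0: every index A reads/writes is in range, so this is exact.
def catalan_number (n : Int) : Int :=
  if n < 0 then 0  -- Python raises ValueError here; excluded by Pre_
  else
    let values : List Int := (List.replicate (n + 1).toNat 0).set 0 1
    let values := (PySem.List.pyRange 1 (n + 1) 1).foldl
      (fun vs k =>
        vs.set k.toNat
          ((PySem.List.pyRange 0 k 1).foldl
            (fun s i => s + vs.getD i.toNat 0 * vs.getD (k - 1 - i).toNat 0) 0))
      values
    values.getD n.toNat 0

-- ===== PORT B =====
def catalan_number_alt (n : Int) : Int :=
  if n < 0 then 0  -- Python raises ValueError here; excluded by Pre_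
  else
    (PySem.List.pyRange 1 (n + 1) 1).foldl
      (fun c k => PySem.Int.floordiv (c * 2 * (2 * k - 1)) (k + 1)) 1

-- ===== PRECONDITION & SPEC =====
-- Pre_ excludes exactly n < 0, where A (and B) raise ValueError.
def Pre_catalan_number (n : Int) : Prop := 0 ≤ n
instance (n : Int) : Decidable (Pre_catalan_number n) := by unfold Pre_catalan_number; infer_instance
def pvWitness_catalan_number : Int := 4

def Spec_catalan_number (n : Int) (out : Int) : Prop := out = catalan_number_alt n
instance (n : Int) (out : Int) : Decidable (Spec_catalan_number n out) := by unfold Spec_catalan_number; infer_instance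

-- ===== CLAIM (what is proved, stated in full; the proofs are below) =====
def Claim_equal_catalan_number : Prop := ∀ (n : Int), Dom_catalan_number n → Pre_catalan_number n → Spec_catalan_number n (catalan_number n)

-- ===== LEMMAS AND PROOFS =====

-- B's loop computes the Catalan numbers.
theorem alt_loop_eq_catalan (N : Nat) :
    (PySem.List.pyRange 1 ((N : Int) + 1) 1).foldl
      (fun c k => PySem.Int.floordiv (c * 2 * (2 * k - 1)) (k + 1)) 1
      = (catalan N : Int) := by
  induction N with
  | zero => rw [PySem.List.pyRange_one_eq_nil (by omega)]; simp
  | succ N ih =>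
    have hb : (1 : Int) ≤ (N : Int) + 1 := by omega
    have hstep : ((N + 1 : Nat) : Int) + 1 = ((N : Int) + 1) + 1 := by push_cast; ring
    rw [hstep, PySem.List.pyRange_one_succ_right hb, List.foldl_append, ih]
    simp only [List.foldl_cons, List.foldl_nil]
    -- the exact-division step: 2*(2N+1)*C(N) = (N+2)*C(N+1)
    have key : 2 * (2 * N + 1) * catalan N = (N + 2) * catalan (N + 1) := by
      have h1 : (N + 1) * (2 * (2 * N + 1) * catalan N)
          = (N + 1) * ((N + 2) * catalan (N + 1)) := by
        calc (N + 1) * (2 * (2 * N + 1) * catalan N)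
            = 2 * (2 * N + 1) * ((N + 1) * catalan N) := by ring
          _ = 2 * (2 * N + 1) * N.centralBinom := by
              rw [succ_mul_catalan_eq_centralBinom]
          _ = (N + 1) * (N + 1).centralBinom := (Nat.succ_mul_centralBinom_succ N).symm
          _ = (N + 1) * ((N + 1 + 1) * catalan (N + 1)) := by
              rw [succ_mul_catalan_eq_centralBinom]
          _ = (N + 1) * ((N + 2) * catalan (N + 1)) := by ring
      exact Nat.eq_of_mul_eq_mul_left (by omega) h1
    have hnum : (catalan N : Int) * 2 * (2 * ((N : Int) + 1) - 1)
        = ((N : Int) + 1 + 1) * (catalan (N + 1) : Int) := by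
      have := congrArg (fun m : Nat => (m : Int)) key
      push_cast at this ⊢
      linarith [this]
    rw [hnum, PySem.Int.floordiv_eq_ediv_of_pos (by omega),
        Int.mul_ediv_cancel_left _ (by omega : ((N : Int) + 1 + 1) ≠ 0)]

-- the filled prefix of A's table
def catTable (N m : Nat) : List Int :=
  (List.range (N + 1)).map (fun j => if j ≤ m then (catalan j : Int) else 0)

theorem catTable_getD (N m j : Nat) (h : j ≤ N) :
    (catTable N m).getD j 0 = if j ≤ m then (catalan j : Int) else 0 := by
  unfold catTable
  rw [List.getD_eq_getElem?_getD]
  simp [Nat.lt_succ_of_le h]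

theorem catTable_init (N : Nat) :
    (List.replicate (N + 1) (0 : Int)).set 0 1 = catTable N 0 := by
  apply List.ext_getElem
  · simp [catTable]
  · intro j h1 h2
    unfold catTable
    rw [List.getElem_set]
    rcases Nat.eq_zero_or_pos j with hj | hj
    · subst hj; simp
    · simp_all [List.getElem_replicate, Nat.pos_iff_ne_zero]
      omega

theorem catTable_set (N m : Nat) (_h : m + 1 ≤ N) :
    (catTable N m).set (m + 1) (catalan (m + 1) : Int) = catTable N (m + 1) := by
  apply List.ext_getElem
  · simp [catTable]
  · intro j h1 h2
    unfold catTable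
    rw [List.getElem_set]
    simp only [List.getElem_map, List.getElem_range]
    split_ifs with he h2 h3 <;> first | rfl | omega | rw [he]

theorem inner_sum_eq (N m : Nat) (hm : m + 1 ≤ N) :
    (PySem.List.pyRange 0 ((m : Int) + 1) 1).foldl
      (fun s i => s + (catTable N m).getD i.toNat 0
        * (catTable N m).getD (((m : Int) + 1) - 1 - i).toNat 0) 0
      = (catalan (m + 1) : Int) := by
  have hcast : ((m : Int) + 1) = ((m + 1 : Nat) : Int) := by push_cast; ring
  rw [hcast, PySem.List.pyRange_zero_natCast, List.foldl_map, PySem.List.foldl_add]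
  have hptw : ∀ i ∈ List.range (m + 1),
      (catTable N m).getD ((i : Int)).toNat 0
        * (catTable N m).getD (((m + 1 : Nat) : Int) - 1 - (i : Int)).toNat 0
      = (catalan i : Int) * (catalan (m - i) : Int) := by
    intro i hi
    rw [List.mem_range] at hi
    have h1 : ((i : Int)).toNat = i := by omega
    have h2 : (((m + 1 : Nat) : Int) - 1 - (i : Int)).toNat = m - i := by omega
    rw [h1, h2, catTable_getD N m i (by omega), catTable_getD N m (m - i) (by omega),
        if_pos (by omega), if_pos (by omega)]
  rw [List.map_congr_left hptw]
  have hsum : ((List.range (m + 1)).map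
      (fun i => (catalan i : Int) * (catalan (m - i) : Int))).sum
      = ∑ i ∈ Finset.range (m + 1), (catalan i : Int) * (catalan (m - i) : Int) := rfl
  rw [hsum]
  have hc : (catalan (m + 1) : Int)
      = ∑ i ∈ Finset.range (m + 1), (catalan i : Int) * (catalan (m - i) : Int) := by
    rw [catalan_succ m, ← Fin.sum_univ_eq_sum_range
      (fun i => (catalan i : Int) * (catalan (m - i) : Int))]
    push_cast
    rfl
  omega
  
theorem a_loop_inv (N m : Nat) (hm : m ≤ N) :
    (PySem.List.pyRange 1 ((m : Int) + 1) 1).foldl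
      (fun vs k =>
        vs.set k.toNat
          ((PySem.List.pyRange 0 k 1).foldl
            (fun s i => s + vs.getD i.toNat 0 * vs.getD (k - 1 - i).toNat 0) 0))
      ((List.replicate (N + 1) 0).set 0 1)
      = catTable N m := by
  induction m with
  | zero => rw [PySem.List.pyRange_one_eq_nil (by omega)]; exact catTable_init N
  | succ m ih =>
    have hb : (1 : Int) ≤ (m : Int) + 1 := by omega
    have hstep : ((m + 1 : Nat) : Int) + 1 = ((m : Int) + 1) + 1 := by push_cast; ring
    rw [hstep, PySem.List.pyRange_one_succ_right hb, List.foldl_append,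
        ih (by omega)]
    simp only [List.foldl_cons, List.foldl_nil]
    have htn : ((m : Int) + 1).toNat = m + 1 := by omega
    rw [htn, inner_sum_eq N m hm, catTable_set N m hm]

theorem a_loop_eq_catTable (N : Nat) :
    (PySem.List.pyRange 1 ((N : Int) + 1) 1).foldl
      (fun vs k =>
        vs.set k.toNat
          ((PySem.List.pyRange 0 k 1).foldl
            (fun s i => s + vs.getD i.toNat 0 * vs.getD (k - 1 - i).toNat 0) 0))
      ((List.replicate (N + 1) 0).set 0 1)
      = catTable N N :=
  a_loop_inv N N le_rfl

-- ===== VERDICT (by name: the statement is the Claim_ definition above) =====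
theorem catalan_number_spec : Claim_equal_catalan_number := by
  intro n _ hpre
  unfold Pre_catalan_number at hpre
  unfold Spec_catalan_number catalan_number catalan_number_alt
  rw [if_neg (by omega), if_neg (by omega)]
  obtain ⟨N, rfl⟩ : ∃ N : Nat, n = (N : Int) := ⟨n.toNat, by omega⟩
  have h1 : ((N : Int) + 1).toNat = N + 1 := by omega
  have h2 : ((N : Int)).toNat = N := by omega
  simp only [h1, h2, alt_loop_eq_catalan N, a_loop_eq_catTable N]
  unfold catTable
  rw [List.getD_eq_getElem?_getD]
  simp
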